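-- pv_equiv track=rewrite | github.com/Michaszek224/praktykaiszeregowaniezadan | zadanie1/algorytmy2/156011.py | compute_sumDj_from_batches
-- ===== SOURCE A (Python) =====
-- from typing import List, Tuple
--
-- def compute_sumDj_from_batches(jobs: List[Tuple[int,int]], s: int, batches: List[List[int]]) -> int:
--     time = 0
--     total = 0
--     first = True
--     for batch in batches:
--         if not first:
--             time += s
--         first = False
--         p_sum = sum(jobs[j-1][0] for j in batch)
--         time += p_sum
--         for j in batch:
--             d = jobs[j-1][1]
--             total += max(0, time - d)
--     return total
-- ===== SOURCE B (Python) =====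
-- def compute_sumDj_from_batches(jobs, s, batches):
--     # Makespan: total processing plus one setup per batch after the first.
--     T = sum(jobs[j-1][0] for batch in batches for j in batch) + max(0, len(batches) - 1) * s
--     total = 0
--     remaining = T
--     # Walk the schedule backwards: the last batch completes at the makespan,
--     # each earlier batch completes one batch-cost (its successor's processing + setup) earlier.
--     for batch in reversed(batches):
--         for j in batch:
--             total += max(0, remaining - jobs[j-1][1])
--         remaining -= sum(jobs[j-1][0] for j in batch) + s
--     return total
-- ===== Notes on version B (the rewrite author's own statement) =====
-- stated objective: alternative
-- what changed: Instead of A's forward loop accumulating completion times, B computes the makespan once and traverses the batches in reverse, maintaining the remaining completion time by subtracting each batch's processing cost plus setup.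
import Mathlib
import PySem

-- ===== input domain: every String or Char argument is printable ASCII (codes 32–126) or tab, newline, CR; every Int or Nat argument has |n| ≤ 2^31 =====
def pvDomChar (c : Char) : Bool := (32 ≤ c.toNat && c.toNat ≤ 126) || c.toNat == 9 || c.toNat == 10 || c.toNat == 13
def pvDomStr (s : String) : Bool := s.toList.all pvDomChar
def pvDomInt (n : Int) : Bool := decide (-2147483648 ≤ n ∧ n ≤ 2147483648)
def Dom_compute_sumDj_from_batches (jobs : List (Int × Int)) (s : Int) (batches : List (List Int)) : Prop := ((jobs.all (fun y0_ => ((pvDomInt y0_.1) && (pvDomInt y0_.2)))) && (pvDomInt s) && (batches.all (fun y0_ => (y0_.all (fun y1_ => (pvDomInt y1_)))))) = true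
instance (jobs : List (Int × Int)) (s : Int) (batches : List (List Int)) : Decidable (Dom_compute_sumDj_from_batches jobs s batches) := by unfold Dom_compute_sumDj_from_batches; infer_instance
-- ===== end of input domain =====

-- B replaces A's forward accumulation of completion times by computing the makespan once and
-- walking the batches in REVERSE, subtracting each batch's cost from a remaining-time counter
-- (alternative traversal, same cost).

-- ===== PORT A =====
-- A's loop body (state = (time, total, first)); jobs[j-1] is PySem.List.pyGetD (exact under Pre_)
def pvStepA (jobs : List (Int × Int)) (s : Int) (st : Int × Int × Bool) (batch : List Int) : Int × Int × Bool :=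
  let time := if st.2.2 = false then st.1 + s else st.1
  let p_sum := batch.foldl (fun acc j => acc + (PySem.List.pyGetD jobs (j-1) (0,0)).1) 0
  let time := time + p_sum
  let total := batch.foldl (fun tot j =>
    tot + max 0 (time - (PySem.List.pyGetD jobs (j-1) (0,0)).2)) st.2.1
  (time, total, false)

def compute_sumDj_from_batches (jobs : List (Int × Int)) (s : Int) (batches : List (List Int)) : Int :=
  (batches.foldl (pvStepA jobs s) (0, 0, true)).2.1

-- ===== PORT B =====
-- B's reversed loop body (state = (total, remaining))
def pvStepB (jobs : List (Int × Int)) (s : Int) (st : Int × Int) (batch : List Int) : Int × Int :=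
  let total := batch.foldl (fun tot j =>
    tot + max 0 (st.2 - (PySem.List.pyGetD jobs (j-1) (0,0)).2)) st.1
  (total, st.2 - batch.foldl (fun acc j => acc + (PySem.List.pyGetD jobs (j-1) (0,0)).1) 0 - s)

def compute_sumDj_from_batches_alt (jobs : List (Int × Int)) (s : Int) (batches : List (List Int)) : Int :=
  let T := batches.foldl (fun acc batch =>
      batch.foldl (fun a j => a + (PySem.List.pyGetD jobs (j-1) (0,0)).1) acc) 0
    + max 0 ((batches.length : Int) - 1) * s
  (batches.reverse.foldl (pvStepB jobs s) (0, T)).1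

-- ===== PRECONDITION & SPEC =====
-- Pre_ excludes exactly the inputs on which the Python A raises IndexError: some listed job
-- index j with j-1 outside Python's index range for jobs.
def Pre_compute_sumDj_from_batches (jobs : List (Int × Int)) (s : Int) (batches : List (List Int)) : Prop :=
  ∀ b ∈ batches, ∀ j ∈ b, PySem.Raise.InRange jobs.length (j - 1)
instance (jobs : List (Int × Int)) (s : Int) (batches : List (List Int)) : Decidable (Pre_compute_sumDj_from_batches jobs s batches) := by unfold Pre_compute_sumDj_from_batches; infer_instance

def pvWitness_compute_sumDj_from_batches : (List (Int × Int)) × Int × List (List Int) :=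
  ([(3, 2), (1, 5)], 2, [[1], [2, 1]])

def Spec_compute_sumDj_from_batches (jobs : List (Int × Int)) (s : Int) (batches : List (List Int)) (out : Int) : Prop := out = compute_sumDj_from_batches_alt jobs s batches
instance (jobs : List (Int × Int)) (s : Int) (batches : List (List Int)) (out : Int) : Decidable (Spec_compute_sumDj_from_batches jobs s batches out) := by unfold Spec_compute_sumDj_from_batches; infer_instance

-- ===== CLAIM (what is proved, stated in full; the proofs are below) =====
def Claim_equal_compute_sumDj_from_batches : Prop := ∀ (jobs : List (Int × Int)) (s : Int) (batches : List (List Int)), Dom_compute_sumDj_from_batches jobs s batches → Pre_compute_sumDj_from_batches jobs s batches → Spec_compute_sumDj_from_batches jobs s batches (compute_sumDj_from_batches jobs s batches)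

-- ===== LEMMAS AND PROOFS =====

-- names for the inner folds (used only by the proofs)
def pvPsum (jobs : List (Int × Int)) (b : List Int) : Int :=
  b.foldl (fun acc j => acc + (PySem.List.pyGetD jobs (j-1) (0,0)).1) 0

def pvTard (jobs : List (Int × Int)) (t : Int) (b : List Int) : Int :=
  b.foldl (fun tot j => tot + max 0 (t - (PySem.List.pyGetD jobs (j-1) (0,0)).2)) 0

theorem pvPsum_acc (jobs : List (Int × Int)) (b : List Int) (acc : Int) :
    b.foldl (fun acc j => acc + (PySem.List.pyGetD jobs (j-1) (0,0)).1) acc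
      = acc + pvPsum jobs b := by
  induction b generalizing acc with
  | nil => simp [pvPsum]
  | cons j bs ih =>
      simp only [List.foldl_cons, pvPsum]
      rw [ih, ih (0 + (PySem.List.pyGetD jobs (j-1) (0,0)).1)]
      ring

theorem pvTard_acc (jobs : List (Int × Int)) (t : Int) (b : List Int) (tot : Int) :
    b.foldl (fun tot j => tot + max 0 (t - (PySem.List.pyGetD jobs (j-1) (0,0)).2)) tot
      = tot + pvTard jobs t b := by
  induction b generalizing tot with
  | nil => simp [pvTard]
  | cons j bs ih =>
      simp only [List.foldl_cons, pvTard]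
      rw [ih, ih (0 + max 0 (t - (PySem.List.pyGetD jobs (j-1) (0,0)).2))]
      ring

theorem pvStepA_false (jobs : List (Int × Int)) (s t tot : Int) (b : List Int) :
    pvStepA jobs s (t, tot, false) b
      = (t + s + pvPsum jobs b, tot + pvTard jobs (t + s + pvPsum jobs b) b, false) := by
  show (_, b.foldl _ tot, false) = _
  rw [pvTard_acc]
  simp only [pvPsum]
  rfl

theorem pvStepA_true (jobs : List (Int × Int)) (s t tot : Int) (b : List Int) :
    pvStepA jobs s (t, tot, true) b
      = (t + pvPsum jobs b, tot + pvTard jobs (t + pvPsum jobs b) b, false) := by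
  show (_, b.foldl _ tot, false) = _
  rw [pvTard_acc]
  simp only [pvPsum]
  rfl

-- forward view of the result: batch k completes at c + Σ p + (i+k)*s
def pvG (jobs : List (Int × Int)) (s : Int) : Int → Int → List (List Int) → Int
  | _, _, [] => 0
  | c, i, b :: bs =>
      pvTard jobs (c + pvPsum jobs b + i * s) b + pvG jobs s (c + pvPsum jobs b) (i + 1) bs

-- A's fold, once past the first batch, computes pvG
theorem pvA_fold (jobs : List (Int × Int)) (s : Int) (bs : List (List Int)) (c i total : Int) :
    (bs.foldl (pvStepA jobs s) (c + i * s, total, false)).2.1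
      = total + pvG jobs s c (i + 1) bs := by
  induction bs generalizing c i total with
  | nil => simp [pvG]
  | cons b rest ih =>
      rw [List.foldl_cons, pvStepA_false,
        show c + i * s + s + pvPsum jobs b = (c + pvPsum jobs b) + (i + 1) * s from by ring,
        ih (c + pvPsum jobs b) (i + 1), pvG]
      ring

theorem pvA_top (jobs : List (Int × Int)) (s : Int) (batches : List (List Int)) :
    compute_sumDj_from_batches jobs s batches = pvG jobs s 0 0 batches := by
  unfold compute_sumDj_from_batches
  cases batches with
  | nil => rfl
  | cons b rest =>
      rw [List.foldl_cons, pvStepA_true,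
        show (0 : Int) + pvPsum jobs b = (0 + pvPsum jobs b) + 0 * s from by ring,
        pvA_fold jobs s rest (0 + pvPsum jobs b) 0, pvG,
        show (0 : Int) + pvPsum jobs b + 0 * s = 0 + pvPsum jobs b from by ring]
      ring

-- total processing of a batch list, and its cost including one setup per batch
def pvS (jobs : List (Int × Int)) : List (List Int) → Int
  | [] => 0
  | b :: bs => pvPsum jobs b + pvS jobs bs

def pvCost (jobs : List (Int × Int)) (s : Int) : List (List Int) → Int
  | [] => 0
  | b :: bs => pvPsum jobs b + s + pvCost jobs s bs

theorem pvCost_eq (jobs : List (Int × Int)) (s : Int) (bs : List (List Int)) :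
    pvCost jobs s bs = pvS jobs bs + (bs.length : Int) * s := by
  induction bs with
  | nil => simp [pvCost, pvS]
  | cons b rest ih =>
      simp only [pvCost, pvS, List.length_cons, ih]
      push_cast
      ring

-- backward view: last batch completes at R, each earlier batch one successor-cost earlier
def pvGrev (jobs : List (Int × Int)) (s : Int) : Int → List (List Int) → Int
  | _, [] => 0
  | R, b :: rest => pvTard jobs (R - pvCost jobs s rest) b + pvGrev jobs s R rest

-- B's reversed fold computes pvGrev and leaves R minus the full cost
theorem pvB_rev (jobs : List (Int × Int)) (s : Int) (bs : List (List Int)) (total R : Int) :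
    bs.reverse.foldl (pvStepB jobs s) (total, R)
      = (total + pvGrev jobs s R bs, R - pvCost jobs s bs) := by
  induction bs generalizing total with
  | nil => simp [pvGrev, pvCost]
  | cons b rest ih =>
      rw [List.reverse_cons, List.foldl_append, ih]
      simp only [List.foldl_cons, List.foldl_nil, pvStepB, pvGrev, pvCost]
      rw [pvTard_acc, pvPsum_acc]
      refine Prod.ext ?_ ?_ <;> simp <;> ring

-- the backward view agrees with the forward view at the right makespan
theorem pvGrev_eq_pvG (jobs : List (Int × Int)) (s : Int) (bs : List (List Int)) (c i : Int) :
    pvGrev jobs s (c + pvS jobs bs + (i + (bs.length : Int) - 1) * s) bs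
      = pvG jobs s c i bs := by
  induction bs generalizing c i with
  | nil => simp [pvGrev, pvG]
  | cons b rest ih =>
      have hR : c + pvS jobs (b :: rest) + (i + ((b :: rest).length : Int) - 1) * s
          = (c + pvPsum jobs b) + pvS jobs rest + ((i + 1) + (rest.length : Int) - 1) * s := by
        simp only [pvS, List.length_cons]
        push_cast
        ring
      rw [pvGrev, hR, ih (c + pvPsum jobs b) (i + 1), pvG, pvCost_eq]
      have : (c + pvPsum jobs b) + pvS jobs rest + ((i + 1) + (rest.length : Int) - 1) * s
          - (pvS jobs rest + (rest.length : Int) * s) = c + pvPsum jobs b + i * s := by ring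
      rw [this]

theorem pvFlatSum (jobs : List (Int × Int)) (bs : List (List Int)) (acc : Int) :
    bs.foldl (fun acc batch =>
        batch.foldl (fun a j => a + (PySem.List.pyGetD jobs (j-1) (0,0)).1) acc) acc
      = acc + pvS jobs bs := by
  induction bs generalizing acc with
  | nil => simp [pvS]
  | cons b rest ih =>
      simp only [List.foldl_cons, pvS]
      rw [pvPsum_acc, ih]
      ring

theorem pvB_top (jobs : List (Int × Int)) (s : Int) (batches : List (List Int)) :
    compute_sumDj_from_batches_alt jobs s batches = pvG jobs s 0 0 batches := by
  unfold compute_sumDj_from_batches_alt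
  cases batches with
  | nil => rfl
  | cons b rest =>
      simp only [pvFlatSum, pvB_rev]
      have hmax : max 0 (((b :: rest).length : Int) - 1) = ((b :: rest).length : Int) - 1 := by
        simp only [List.length_cons]
        push_cast
        omega
      rw [hmax,
        show (0 : Int) + pvS jobs (b :: rest) + (((b :: rest).length : Int) - 1) * s
          = 0 + pvS jobs (b :: rest) + ((0 : Int) + ((b :: rest).length : Int) - 1) * s from by ring,
        pvGrev_eq_pvG jobs s (b :: rest) 0 0]
      ring

-- ===== VERDICT (by name: the statement is the Claim_ definition above) =====
theorem compute_sumDj_from_batches_spec : Claim_equal_compute_sumDj_from_batches := by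
  intro jobs s batches _ _
  unfold Spec_compute_sumDj_from_batches
  rw [pvA_top, pvB_top]
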